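-- pv_equiv track=rewrite | github.com/Nikhilwaghmare45/Etutor | Etutor/assessment.py | recommend_starting_chapters
-- ===== SOURCE A (Python) =====
-- def recommend_starting_chapters(score_percentages):
--     """
--     Recommend starting chapters based on assessment scores using a simple ML-like approach
--     """
--     recommended_chapters = {
--         "python": 1,
--         "data_analytics": 1,
--         "full_stack": 1
--     }
--
--     # Define thresholds for chapter recommendations
--     # Based on score percentage, recommend starting at different chapters
--     thresholds = {
--         "beginner": 30,     # 0-30% - start at chapter 1
--         "intermediate": 60, # 31-60% - start at chapter 3
--         "advanced": 80      # 61-80% - start at chapter 5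
--                             # 81-100% - start at chapter 7
--     }
--
--     # Map course names to keys used in the recommended_chapters dict
--     course_key_map = {
--         "Python": "python",
--         "Data Analytics": "data_analytics",
--         "Full Stack": "full_stack"
--     }
--
--     for course, percentage in score_percentages.items():
--         course_key = course_key_map.get(course)
--         if course_key:
--             if percentage <= thresholds["beginner"]:
--                 # Beginner level - start at chapter 1
--                 recommended_chapters[course_key] = 1
--             elif percentage <= thresholds["intermediate"]:
--                 # Intermediate level - start at chapter 3
--                 recommended_chapters[course_key] = 3
--             elif percentage <= thresholds["advanced"]:
--                 # Advanced level - start at chapter 5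
--                 recommended_chapters[course_key] = 5
--             else:
--                 # Expert level - start at chapter 7
--                 recommended_chapters[course_key] = 7
--
--     return recommended_chapters
-- ===== SOURCE B (Python) =====
-- def recommend_starting_chapters(score_percentages):
--     """Same recommendations, computed by iterating the fixed course map and
--     deriving the chapter with the closed form 2*(#thresholds below score)+1."""
--     course_key_map = {
--         "Python": "python",
--         "Data Analytics": "data_analytics",
--         "Full Stack": "full_stack",
--     }
--     result = {}
--     for course, key in course_key_map.items():
--         if course in score_percentages:
--             p = score_percentages[course]
--             result[key] = 2 * sum(t < p for t in (30, 60, 80)) + 1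
--         else:
--             result[key] = 1
--     return result
-- ===== Notes on version B (the rewrite author's own statement) =====
-- stated objective: alternative
-- what changed: B inverts the traversal: instead of scanning the scores and updating a pre-seeded result dict through an if/elif threshold ladder, it iterates the fixed three-entry course map, looks each course up in the scores dict, and computes the chapter with the closed form 2*(#thresholds strictly below the score)+1.
import Mathlib
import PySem

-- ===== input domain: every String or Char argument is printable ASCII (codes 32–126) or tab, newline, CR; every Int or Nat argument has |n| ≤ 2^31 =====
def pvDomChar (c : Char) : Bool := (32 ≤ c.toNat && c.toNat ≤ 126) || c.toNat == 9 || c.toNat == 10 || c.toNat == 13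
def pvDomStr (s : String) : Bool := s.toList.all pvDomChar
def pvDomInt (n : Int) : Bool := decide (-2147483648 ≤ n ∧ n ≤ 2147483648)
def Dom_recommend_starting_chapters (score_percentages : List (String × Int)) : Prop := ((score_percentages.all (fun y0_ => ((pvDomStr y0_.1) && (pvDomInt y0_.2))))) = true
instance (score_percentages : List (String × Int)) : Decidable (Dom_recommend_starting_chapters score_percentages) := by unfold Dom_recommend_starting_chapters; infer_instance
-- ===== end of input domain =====

-- B iterates the fixed course map (lookup into the scores) instead of the scores, and
-- replaces the if/elif threshold ladder by the closed form 2*(#thresholds below score)+1; objective: alternative.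

-- ===== PORT A =====
def recommend_starting_chapters (score_percentages : List (String × Int)) : List (String × Int) :=
  let recommended := PySem.Dict.ofList [("python", (1 : Int)), ("data_analytics", 1), ("full_stack", 1)]
  let thresholds := PySem.Dict.ofList [("beginner", (30 : Int)), ("intermediate", 60), ("advanced", 80)]
  let course_key_map := PySem.Dict.ofList [("Python", "python"), ("Data Analytics", "data_analytics"), ("Full Stack", "full_stack")]
  -- thresholds["…"]: the three keys are present, so getD is exact; `if course_key:` is
  -- string truthiness — every value of course_key_map is nonempty, so it is exactly the some-case.
  (score_percentages.foldl (fun rec_ cp =>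
      match course_key_map.get? cp.1 with
      | some course_key =>
          if cp.2 ≤ thresholds.getD "beginner" 0 then rec_.insert course_key 1
          else if cp.2 ≤ thresholds.getD "intermediate" 0 then rec_.insert course_key 3
          else if cp.2 ≤ thresholds.getD "advanced" 0 then rec_.insert course_key 5
          else rec_.insert course_key 7
      | none => rec_) recommended).items

-- ===== PORT B =====
def pvChapter (p : Int) : Int :=
  2 * (([30, 60, 80] : List Int).countP (fun t => decide (t < p))) + 1

def recommend_starting_chapters_alt (score_percentages : List (String × Int)) : List (String × Int) :=
  let scores := PySem.Dict.ofList score_percentages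
  (([("Python", "python"), ("Data Analytics", "data_analytics"), ("Full Stack", "full_stack")] : List (String × String)).foldl
    (fun res ck =>
      match scores.get? ck.1 with
      | some p => res.insert ck.2 (pvChapter p)
      | none => res.insert ck.2 1) PySem.Dict.empty).items

-- ===== PRECONDITION & SPEC =====
def Spec_recommend_starting_chapters (score_percentages : List (String × Int)) (out : List (String × Int)) : Prop := out = recommend_starting_chapters_alt score_percentages
instance (score_percentages : List (String × Int)) (out : List (String × Int)) : Decidable (Spec_recommend_starting_chapters score_percentages out) := by unfold Spec_recommend_starting_chapters; infer_instance

-- ===== CLAIM (what is proved, stated in full; the proofs are below) =====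
def Claim_equal_recommend_starting_chapters : Prop := ∀ (score_percentages : List (String × Int)), Dom_recommend_starting_chapters score_percentages → Spec_recommend_starting_chapters score_percentages (recommend_starting_chapters score_percentages)

-- ===== LEMMAS AND PROOFS =====

-- A's threshold ladder as a function.
def pvLadder (p : Int) : Int :=
  if p ≤ 30 then 1 else if p ≤ 60 then 3 else if p ≤ 80 then 5 else 7

theorem pvChapter_eq_ladder (p : Int) : pvChapter p = pvLadder p := by
  simp only [pvChapter, pvLadder, List.countP, List.countP.go, Bool.cond_eq_ite,
    decide_eq_true_eq]
  split_ifs <;> omega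

-- last value stored under key n by the entries of sp, as Python's dict(sp)[n]
def pvLast (sp : List (String × Int)) (n : String) : Option Int :=
  sp.foldl (fun acc cp => if cp.1 == n then some cp.2 else acc) none

theorem get?_foldl_insert (sp : List (String × Int)) (n : String) :
    ∀ d : PySem.Dict String Int,
      (sp.foldl (fun d cp => d.insert cp.1 cp.2) d).get? n =
        sp.foldl (fun acc cp => if cp.1 == n then some cp.2 else acc) (d.get? n) := by
  induction sp with
  | nil => intro d; rfl
  | cons cp tl ih =>
      intro d
      simp only [List.foldl_cons, ih]
      congr 1
      by_cases h : cp.1 = n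
      · simp [h, PySem.Dict.get?_insert_self]
      · simp [PySem.Dict.get?_insert_of_ne d cp.2 (Ne.symm h), h]

theorem ofList_get?_eq_pvLast (sp : List (String × Int)) (n : String) :
    (PySem.Dict.ofList sp).get? n = pvLast sp n := by
  have h := get?_foldl_insert sp n PySem.Dict.empty
  simpa [PySem.Dict.get?_empty, pvLast] using h

-- the value the ladder-update loop leaves under a key, given the last stored score
def pvG (o : Option Int) (x : Int) : Int :=
  match o with
  | none => x
  | some p => pvLadder p

theorem foldl_ladder_eq_pvG (n : String) (sp : List (String × Int)) :
    ∀ (o : Option Int) (x : Int),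
      sp.foldl (fun acc cp => if cp.1 == n then pvLadder cp.2 else acc) (pvG o x) =
        pvG (sp.foldl (fun acc cp => if cp.1 == n then some cp.2 else acc) o) x := by
  induction sp with
  | nil => intro o x; rfl
  | cons cp tl ih =>
      intro o x
      by_cases h : cp.1 = n
      · have hc : (cp.1 == n) = true := by simp [h]
        simp only [List.foldl_cons, hc, if_true]
        rw [show pvLadder cp.2 = pvG (some cp.2) x from rfl, ih]
      · have hc : (cp.1 == n) = false := by simp [h]
        simp only [List.foldl_cons, hc, Bool.false_eq_true, if_false]
        exact ih o x

-- the main loop invariant of A: the state always has the three fixed keys, each updated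
-- by the ladder on its matching course entries
theorem foldA_inv (sp : List (String × Int)) :
    ∀ (a b c : Int),
      (sp.foldl (fun rec_ cp =>
        match (PySem.Dict.ofList [("Python", "python"), ("Data Analytics", "data_analytics"), ("Full Stack", "full_stack")]).get? cp.1 with
        | some course_key =>
            if cp.2 ≤ (30 : Int) then rec_.insert course_key 1
            else if cp.2 ≤ 60 then rec_.insert course_key 3
            else if cp.2 ≤ 80 then rec_.insert course_key 5
            else rec_.insert course_key 7
        | none => rec_)
        (PySem.Dict.mk [("python", a), ("data_analytics", b), ("full_stack", c)])) =
      PySem.Dict.mk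
        [("python", sp.foldl (fun acc cp => if cp.1 == "Python" then pvLadder cp.2 else acc) a),
         ("data_analytics", sp.foldl (fun acc cp => if cp.1 == "Data Analytics" then pvLadder cp.2 else acc) b),
         ("full_stack", sp.foldl (fun acc cp => if cp.1 == "Full Stack" then pvLadder cp.2 else acc) c)] := by
  induction sp with
  | nil => intro a b c; rfl
  | cons cp tl ih =>
      intro a b c
      by_cases h1 : cp.1 = "Python"
      · have hstep :
            (match (PySem.Dict.ofList [("Python", "python"), ("Data Analytics", "data_analytics"), ("Full Stack", "full_stack")]).get? cp.1 with
              | some course_key =>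
                  if cp.2 ≤ (30 : Int) then (PySem.Dict.mk [("python", a), ("data_analytics", b), ("full_stack", c)]).insert course_key 1
                  else if cp.2 ≤ 60 then (PySem.Dict.mk [("python", a), ("data_analytics", b), ("full_stack", c)]).insert course_key 3
                  else if cp.2 ≤ 80 then (PySem.Dict.mk [("python", a), ("data_analytics", b), ("full_stack", c)]).insert course_key 5
                  else (PySem.Dict.mk [("python", a), ("data_analytics", b), ("full_stack", c)]).insert course_key 7
              | none => PySem.Dict.mk [("python", a), ("data_analytics", b), ("full_stack", c)]) =
            PySem.Dict.mk [("python", pvLadder cp.2), ("data_analytics", b), ("full_stack", c)] := by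
          simp only [h1,
            show (PySem.Dict.ofList [("Python", "python"), ("Data Analytics", "data_analytics"), ("Full Stack", "full_stack")]).get? "Python" = some "python" from rfl,
            pvLadder]
          split_ifs <;> simp [PySem.Dict.insert]
        rw [List.foldl_cons, hstep, ih]
        simp [List.foldl_cons, h1]
      · by_cases h2 : cp.1 = "Data Analytics"
        · have hstep :
              (match (PySem.Dict.ofList [("Python", "python"), ("Data Analytics", "data_analytics"), ("Full Stack", "full_stack")]).get? cp.1 with
                | some course_key =>
                    if cp.2 ≤ (30 : Int) then (PySem.Dict.mk [("python", a), ("data_analytics", b), ("full_stack", c)]).insert course_key 1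
                    else if cp.2 ≤ 60 then (PySem.Dict.mk [("python", a), ("data_analytics", b), ("full_stack", c)]).insert course_key 3
                    else if cp.2 ≤ 80 then (PySem.Dict.mk [("python", a), ("data_analytics", b), ("full_stack", c)]).insert course_key 5
                    else (PySem.Dict.mk [("python", a), ("data_analytics", b), ("full_stack", c)]).insert course_key 7
                | none => PySem.Dict.mk [("python", a), ("data_analytics", b), ("full_stack", c)]) =
              PySem.Dict.mk [("python", a), ("data_analytics", pvLadder cp.2), ("full_stack", c)] := by
            simp only [h2,
              show (PySem.Dict.ofList [("Python", "python"), ("Data Analytics", "data_analytics"), ("Full Stack", "full_stack")]).get? "Data Analytics" = some "data_analytics" from rfl,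
              pvLadder]
            split_ifs <;> simp [PySem.Dict.insert]
          rw [List.foldl_cons, hstep, ih]
          simp [List.foldl_cons, h2]
        · by_cases h3 : cp.1 = "Full Stack"
          · have hstep :
                (match (PySem.Dict.ofList [("Python", "python"), ("Data Analytics", "data_analytics"), ("Full Stack", "full_stack")]).get? cp.1 with
                  | some course_key =>
                      if cp.2 ≤ (30 : Int) then (PySem.Dict.mk [("python", a), ("data_analytics", b), ("full_stack", c)]).insert course_key 1
                      else if cp.2 ≤ 60 then (PySem.Dict.mk [("python", a), ("data_analytics", b), ("full_stack", c)]).insert course_key 3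
                      else if cp.2 ≤ 80 then (PySem.Dict.mk [("python", a), ("data_analytics", b), ("full_stack", c)]).insert course_key 5
                      else (PySem.Dict.mk [("python", a), ("data_analytics", b), ("full_stack", c)]).insert course_key 7
                  | none => PySem.Dict.mk [("python", a), ("data_analytics", b), ("full_stack", c)]) =
                PySem.Dict.mk [("python", a), ("data_analytics", b), ("full_stack", pvLadder cp.2)] := by
              simp only [h3,
                show (PySem.Dict.ofList [("Python", "python"), ("Data Analytics", "data_analytics"), ("Full Stack", "full_stack")]).get? "Full Stack" = some "full_stack" from rfl,
                pvLadder]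
              split_ifs <;> simp [PySem.Dict.insert]
            rw [List.foldl_cons, hstep, ih]
            simp [List.foldl_cons, h3]
          · have hn : (PySem.Dict.ofList [("Python", "python"), ("Data Analytics", "data_analytics"), ("Full Stack", "full_stack")]).get? cp.1 = none := by
              rw [show PySem.Dict.ofList [("Python", "python"), ("Data Analytics", "data_analytics"), ("Full Stack", "full_stack")] = PySem.Dict.mk [("Python", "python"), ("Data Analytics", "data_analytics"), ("Full Stack", "full_stack")] from rfl]
              rw [PySem.Dict.get?_mk_cons, PySem.Dict.get?_mk_cons, PySem.Dict.get?_mk_cons,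
                show (PySem.Dict.mk ([] : List (String × String))).get? cp.1 = none from rfl]
              have e1 : ("Python" == cp.1) = false := beq_eq_false_iff_ne.mpr (fun h => h1 h.symm)
              have e2 : ("Data Analytics" == cp.1) = false := beq_eq_false_iff_ne.mpr (fun h => h2 h.symm)
              have e3 : ("Full Stack" == cp.1) = false := beq_eq_false_iff_ne.mpr (fun h => h3 h.symm)
              simp [e1, e2, e3]
            rw [List.foldl_cons, hn]
            rw [ih]
            simp [List.foldl_cons, h1, h2, h3]

-- ===== VERDICT (by name: the statement is the Claim_ definition above) =====
theorem recommend_starting_chapters_spec : Claim_equal_recommend_starting_chapters := by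
  intro sp _
  unfold Spec_recommend_starting_chapters recommend_starting_chapters recommend_starting_chapters_alt
  simp only [
    show (PySem.Dict.ofList [("beginner", (30 : Int)), ("intermediate", 60), ("advanced", 80)]).getD "beginner" 0 = 30 from rfl,
    show (PySem.Dict.ofList [("beginner", (30 : Int)), ("intermediate", 60), ("advanced", 80)]).getD "intermediate" 0 = 60 from rfl,
    show (PySem.Dict.ofList [("beginner", (30 : Int)), ("intermediate", 60), ("advanced", 80)]).getD "advanced" 0 = 80 from rfl,
    show PySem.Dict.ofList [("python", (1 : Int)), ("data_analytics", 1), ("full_stack", 1)] = PySem.Dict.mk [("python", (1 : Int)), ("data_analytics", 1), ("full_stack", 1)] from rfl]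
  rw [foldA_inv sp 1 1 1]
  have hb : ∀ n : String,
      (match (PySem.Dict.ofList sp).get? n with
        | some p => pvChapter p
        | none => (1 : Int)) = pvG (pvLast sp n) 1 := by
    intro n
    rw [← ofList_get?_eq_pvLast]
    cases (PySem.Dict.ofList sp).get? n with
    | none => rfl
    | some p => simp [pvG, pvChapter_eq_ladder]
  have hcomm : ∀ (res : PySem.Dict String Int) (n k : String),
      (match (PySem.Dict.ofList sp).get? n with
        | some p => res.insert k (pvChapter p)
        | none => res.insert k 1) = res.insert k (pvG (pvLast sp n) 1) := by
    intro res n k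
    rw [← hb n]
    cases (PySem.Dict.ofList sp).get? n <;> rfl
  have ha : ∀ n : String,
      sp.foldl (fun acc cp => if cp.1 == n then pvLadder cp.2 else acc) 1 = pvG (pvLast sp n) 1 := by
    intro n
    have := foldl_ladder_eq_pvG n sp none 1
    simpa [pvG, pvLast] using this
  simp only [List.foldl_cons, List.foldl_nil, hcomm]
  simp [PySem.Dict.insert, PySem.Dict.empty]
  exact ⟨by simpa using ha "Python", by simpa using ha "Data Analytics", by simpa using ha "Full Stack"⟩
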